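-- pv_equiv track=rewrite | github.com/ericzhang98/dotfiles | algo_library/dinics.py | construct_layered_graph
-- ===== SOURCE A (Python) =====
-- import collections
--
-- def construct_layered_graph(graph, source):
--     layered_graph = collections.defaultdict(lambda: collections.defaultdict(int))
--     dists = {source: 0}
--     queue = collections.deque([(source, dists[source])])
--     while queue:
--         u, dist = queue.popleft()
--         for v, capacity in graph[u].items():
--             if capacity > 0:
--                 if v not in dists:
--                     dists[v] = dist+1
--                     queue.append((v, dists[v]))
--                 if dists[v] == dists[u]+1:
--                     layered_graph[u][v] = capacity
--     return layered_graph
-- ===== SOURCE B (Python) =====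
-- import collections
--
-- def construct_layered_graph(graph, source):
--     # Phase 1: plain BFS over positive-capacity edges, computing only the level map.
--     dists = {source: 0}
--     queue = collections.deque([source])
--     while queue:
--         u = queue.popleft()
--         for v, capacity in graph[u].items():
--             if capacity > 0 and v not in dists:
--                 dists[v] = dists[u] + 1
--                 queue.append(v)
--     # Phase 2: one scan per reached node; keep exactly the edges that go down one level.
--     layered_graph = collections.defaultdict(lambda: collections.defaultdict(int))
--     for u, du in dists.items():
--         for v, capacity in graph[u].items():
--             if capacity > 0 and dists.get(v) == du + 1:
--                 layered_graph[u][v] = capacity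
--     return layered_graph
-- ===== Notes on version B (the rewrite author's own statement) =====
-- stated objective: alternative
-- what changed: A interleaves building the layered graph with the BFS inside one loop; B first runs a pure BFS that computes only the level map, then in a separate pass over the reached nodes keeps exactly the positive edges that descend one level.
import Mathlib
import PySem

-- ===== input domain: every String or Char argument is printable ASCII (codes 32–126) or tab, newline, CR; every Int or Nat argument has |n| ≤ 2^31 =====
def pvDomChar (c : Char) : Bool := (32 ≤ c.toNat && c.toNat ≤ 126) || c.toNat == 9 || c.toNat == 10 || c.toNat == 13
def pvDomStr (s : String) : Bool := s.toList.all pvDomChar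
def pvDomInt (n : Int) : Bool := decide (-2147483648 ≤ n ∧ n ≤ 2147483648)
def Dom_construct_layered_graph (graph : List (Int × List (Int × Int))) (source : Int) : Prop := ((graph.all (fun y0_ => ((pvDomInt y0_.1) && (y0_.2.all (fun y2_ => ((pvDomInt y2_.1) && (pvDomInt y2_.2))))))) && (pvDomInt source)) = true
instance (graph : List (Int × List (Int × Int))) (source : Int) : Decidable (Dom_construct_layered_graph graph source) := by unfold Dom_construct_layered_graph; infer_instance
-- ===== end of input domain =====

-- B replaces A's single loop (BFS interleaved with building the layered graph) by a pure BFS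
-- computing only the level map, followed by a separate per-node scan keeping the edges that
-- descend one level; same asymptotic cost, different decomposition.

-- ===== PORT A =====
-- A's inner 'for v, capacity in graph[u].items()' body; state = (queue, dists, layered_graph).
-- 'graph[u]' is ported with getD [] (under Pre_ the key is always present; Python's KeyError
-- cases are excluded by Pre_); likewise dists lookups use getD 0 where A's keys always exist.
def clgEdge (u du : Int)
    (st : List (Int × Int) × PySem.Dict Int Int × PySem.Dict Int (PySem.Dict Int Int))
    (e : Int × Int) :
    List (Int × Int) × PySem.Dict Int Int × PySem.Dict Int (PySem.Dict Int Int) :=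
  if 0 < e.2 then
    -- 'if v not in dists: dists[v] = dist+1; queue.append((v, dists[v]))'
    let st1 := if st.2.1.contains e.1 then st
      else (st.1 ++ [(e.1, (st.2.1.insert e.1 (du + 1)).getD e.1 0)],
            st.2.1.insert e.1 (du + 1), st.2.2)
    -- 'if dists[v] == dists[u]+1: layered_graph[u][v] = capacity'
    if st1.2.1.getD e.1 0 = st1.2.1.getD u 0 + 1 then
      (st1.1, st1.2.1,
       st1.2.2.insert u ((st1.2.2.getD u PySem.Dict.empty).insert e.1 e.2))
    else st1
  else st

def clgFold (u du : Int) (adj : List (Int × Int))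
    (q : List (Int × Int)) (dists : PySem.Dict Int Int)
    (lay : PySem.Dict Int (PySem.Dict Int Int)) :
    List (Int × Int) × PySem.Dict Int Int × PySem.Dict Int (PySem.Dict Int Int) :=
  adj.foldl (clgEdge u du) (q, dists, lay)

-- A's 'while queue' loop; fuel bounds the number of dequeues (each dequeue after the first
-- corresponds to a fresh dists key, and every key entering dists is source or some edge
-- target, so graph.length + #edge-entries + 1 dequeues always suffice).
def clgLoop (graph : List (Int × List (Int × Int))) :
    Nat → List (Int × Int) → PySem.Dict Int Int →
    PySem.Dict Int (PySem.Dict Int Int) → PySem.Dict Int (PySem.Dict Int Int)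
  | 0, _, _, lay => lay
  | _ + 1, [], _, lay => lay
  | fuel + 1, (u, du) :: qs, dists, lay =>
    let st := clgFold u du ((PySem.Dict.mk graph).getD u []) qs dists lay
    clgLoop graph fuel st.1 st.2.1 st.2.2

def construct_layered_graph (graph : List (Int × List (Int × Int))) (source : Int) :
    List (Int × List (Int × Int)) :=
  (clgLoop graph (graph.length + (graph.flatMap (fun p => p.2)).length + 1) [(source, 0)] (PySem.Dict.mk [(source, 0)])
      PySem.Dict.empty).items.map (fun p => (p.1, p.2.items))

-- ===== PORT B =====
-- B phase 1: inner loop of the pure BFS; state = (queue, dists).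
def bfsEdge (du : Int) (st : List Int × PySem.Dict Int Int) (e : Int × Int) :
    List Int × PySem.Dict Int Int :=
  if 0 < e.2 ∧ st.2.contains e.1 = false
  then (st.1 ++ [e.1], st.2.insert e.1 (du + 1)) else st

def bfsFold (du : Int) (adj : List (Int × Int)) (q : List Int)
    (dists : PySem.Dict Int Int) : List Int × PySem.Dict Int Int :=
  adj.foldl (bfsEdge du) (q, dists)

def bfsLoop (graph : List (Int × List (Int × Int))) :
    Nat → List Int → PySem.Dict Int Int → PySem.Dict Int Int
  | 0, _, dists => dists
  | _ + 1, [], dists => dists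
  | fuel + 1, u :: qs, dists =>
    let st := bfsFold (dists.getD u 0) ((PySem.Dict.mk graph).getD u []) qs dists
    bfsLoop graph fuel st.1 st.2

-- B phase 2, inner loop: 'if capacity > 0 and dists.get(v) == du + 1: layered_graph[u][v] = capacity'
def p2edge (u du : Int) (D : PySem.Dict Int Int)
    (lay : PySem.Dict Int (PySem.Dict Int Int)) (e : Int × Int) :
    PySem.Dict Int (PySem.Dict Int Int) :=
  if 0 < e.2 ∧ D.get? e.1 = some (du + 1)
  then lay.insert u ((lay.getD u PySem.Dict.empty).insert e.1 e.2) else lay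

def p2fold (u du : Int) (D : PySem.Dict Int Int) (adj : List (Int × Int))
    (lay : PySem.Dict Int (PySem.Dict Int Int)) : PySem.Dict Int (PySem.Dict Int Int) :=
  adj.foldl (p2edge u du D) lay

-- B phase 2, one node of 'for u, du in dists.items()'.
def p2step (graph : List (Int × List (Int × Int))) (D : PySem.Dict Int Int)
    (lay : PySem.Dict Int (PySem.Dict Int Int)) (p : Int × Int) :
    PySem.Dict Int (PySem.Dict Int Int) :=
  p2fold p.1 p.2 D ((PySem.Dict.mk graph).getD p.1 []) lay

def construct_layered_graph_alt (graph : List (Int × List (Int × Int))) (source : Int) :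
    List (Int × List (Int × Int)) :=
  let D := bfsLoop graph (graph.length + (graph.flatMap (fun p => p.2)).length + 1) [source] (PySem.Dict.mk [(source, 0)])
  (D.items.foldl (p2step graph D) PySem.Dict.empty).items.map (fun p => (p.1, p.2.items))

-- ===== PRECONDITION & SPEC =====
-- reachable-set closure used only to STATE Pre_ (a graph-theoretic closure, not either port's
-- queue/dists/layered-graph algorithm): one expansion step adds the positive-capacity targets
-- of every node of the set (nodes that are not keys contribute nothing).
def reachExpand (graph : List (Int × List (Int × Int))) (s : PySem.Set Int) : PySem.Set Int :=
  s.foldl (fun acc u =>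
    ((PySem.Dict.mk graph).getD u []).foldl
      (fun acc e => if 0 < e.2 then PySem.Set.add acc e.1 else acc) acc) s

def reachSet (graph : List (Int × List (Int × Int))) (source : Int) : PySem.Set Int :=
  (reachExpand graph)^[graph.length + 1] (PySem.Set.ofList [source])

-- Pre_ excludes exactly the inputs on which A raises KeyError: those where some node reachable
-- from source along positive-capacity edges (through keys of graph) is not a key of graph.
def Pre_construct_layered_graph (graph : List (Int × List (Int × Int))) (source : Int) : Prop :=
  ∀ v ∈ reachSet graph source, v ∈ graph.map Prod.fst
instance (graph : List (Int × List (Int × Int))) (source : Int) :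
    Decidable (Pre_construct_layered_graph graph source) := by
  unfold Pre_construct_layered_graph; infer_instance
def pvWitness_construct_layered_graph : (List (Int × List (Int × Int))) × Int :=
  ([(0, [(1, 5)]), (1, [])], 0)

def Spec_construct_layered_graph (graph : List (Int × List (Int × Int))) (source : Int) (out : List (Int × List (Int × Int))) : Prop := out = construct_layered_graph_alt graph source
instance (graph : List (Int × List (Int × Int))) (source : Int) (out : List (Int × List (Int × Int))) : Decidable (Spec_construct_layered_graph graph source out) := by unfold Spec_construct_layered_graph; infer_instance

-- ===== CLAIM (what is proved, stated in full; the proofs are below) =====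
def Claim_equal_construct_layered_graph : Prop := ∀ (graph : List (Int × List (Int × Int))) (source : Int), Dom_construct_layered_graph graph source → Pre_construct_layered_graph graph source → Spec_construct_layered_graph graph source (construct_layered_graph graph source)

-- ===== LEMMAS AND PROOFS =====

-- appending items does not disturb lookups of already-present keys
lemma contains_items_mono {ν : Type} (d d' : PySem.Dict Int ν) (ext : List (Int × ν))
    (hit : d'.items = d.items ++ ext) (k : Int) (hc : d.contains k = true) :
    d'.contains k = true := by
  simp [PySem.Dict.contains, hit, List.any_append] at *
  exact Or.inl hc

lemma get?_items_mono {ν : Type} (d d' : PySem.Dict Int ν) (ext : List (Int × ν))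
    (hit : d'.items = d.items ++ ext) (k : Int) (hc : d.contains k = true) :
    d'.get? k = d.get? k := by
  simp only [PySem.Dict.get?, hit, List.find?_append]
  have : (d.items.find? (fun p => p.1 == k)).isSome = true := by
    simpa [List.find?_isSome, PySem.Dict.contains] using hc
  cases hfind : d.items.find? (fun p => p.1 == k) with
  | none => simp [hfind] at this
  | some p => simp

-- step correspondence: A's combined inner loop, against B's BFS inner loop and the
-- phase-2 fold evaluated at the dists produced by the step itself
lemma step_corr (u du : Int) :
    ∀ (adj : List (Int × Int)) (qA : List (Int × Int)) (qB : List Int)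
      (dists : PySem.Dict Int Int) (lay : PySem.Dict Int (PySem.Dict Int Int)),
    dists.contains u = true →
    dists.getD u 0 = du →
    dists.keys.Nodup →
    ∃ new : List (Int × Int),
      (clgFold u du adj qA dists lay).1 = qA ++ new ∧
      (clgFold u du adj qA dists lay).2.1.items = dists.items ++ new ∧
      (bfsFold du adj qB dists).1 = qB ++ new.map Prod.fst ∧
      (bfsFold du adj qB dists).2 = (clgFold u du adj qA dists lay).2.1 ∧
      (clgFold u du adj qA dists lay).2.1.keys.Nodup ∧
      (∀ e ∈ new, ∃ c, (e.1, c) ∈ adj ∧ 0 < c) ∧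
      (∀ e ∈ adj, 0 < e.2 → (clgFold u du adj qA dists lay).2.1.contains e.1 = true) ∧
      (clgFold u du adj qA dists lay).2.2
        = p2fold u du (clgFold u du adj qA dists lay).2.1 adj lay := by
  intro adj
  induction adj with
  | nil =>
    intro qA qB dists lay hcu hgu hnd
    exact ⟨[], by simp [clgFold], by simp [clgFold], by simp [bfsFold],
      by simp [bfsFold, clgFold], by simpa [clgFold] using hnd,
      by simp, by simp, by simp [clgFold, p2fold]⟩
  | cons e adj ih =>
    intro qA qB dists lay hcu hgu hnd
    by_cases hpos : 0 < e.2
    · by_cases hc : dists.contains e.1 = true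
      · -- e.1 already reached
        have hx : ∃ x, dists.get? e.1 = some x := by
          have h := PySem.Dict.contains_eq_isSome_get? dists e.1
          rw [hc] at h
          exact Option.isSome_iff_exists.mp h.symm
        obtain ⟨x, hx⟩ := hx
        have hDx : dists.getD e.1 0 = x := by simp [PySem.Dict.getD, hx]
        by_cases hx1 : x = du + 1
        · -- layered edge, no new node
          have hE : clgEdge u du (qA, dists, lay) e
              = (qA, dists, lay.insert u ((lay.getD u PySem.Dict.empty).insert e.1 e.2)) := by
            simp [clgEdge, hpos, hc, hDx, hgu, hx1]
          have hred : clgFold u du (e :: adj) qA dists lay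
              = clgFold u du adj qA dists
                  (lay.insert u ((lay.getD u PySem.Dict.empty).insert e.1 e.2)) := by
            rw [clgFold, List.foldl_cons, hE]; rfl
          have hredB : bfsFold du (e :: adj) qB dists = bfsFold du adj qB dists := by
            rw [bfsFold, List.foldl_cons, bfsEdge, if_neg (by simp [hc])]; rfl
          obtain ⟨new, c1, c2, c3, c4, c5, c6, c7, c8⟩ :=
            ih qA qB dists (lay.insert u ((lay.getD u PySem.Dict.empty).insert e.1 e.2))
              hcu hgu hnd
          have hget : (clgFold u du (e :: adj) qA dists lay).2.1.get? e.1 = some (du + 1) := by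
            rw [hred, get?_items_mono dists _ new c2 e.1 hc, hx, hx1]
          refine ⟨new, by rw [hred]; exact c1, by rw [hred]; exact c2,
            by rw [hredB]; exact c3, by rw [hredB, hred]; exact c4,
            by rw [hred]; exact c5,
            fun p hp => (c6 p hp).imp (fun c hc' => ⟨List.mem_cons_of_mem _ hc'.1, hc'.2⟩),
            ?_, ?_⟩
          · intro e' he' hp'
            rcases List.mem_cons.mp he' with rfl | he'
            · rw [hred]
              exact contains_items_mono dists _ new c2 e'.1 hc
            · rw [hred]; exact c7 e' he' hp'
          · rw [p2fold, List.foldl_cons, p2edge, if_pos ⟨hpos, hget⟩, hred]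
            exact c8
        · -- edge does not descend one level: nothing happens
          have hE : clgEdge u du (qA, dists, lay) e = (qA, dists, lay) := by
            simp [clgEdge, hpos, hc, hDx, hgu, hx1]
          have hred : clgFold u du (e :: adj) qA dists lay
              = clgFold u du adj qA dists lay := by
            rw [clgFold, List.foldl_cons, hE]; rfl
          have hredB : bfsFold du (e :: adj) qB dists = bfsFold du adj qB dists := by
            rw [bfsFold, List.foldl_cons, bfsEdge, if_neg (by simp [hc])]; rfl
          obtain ⟨new, c1, c2, c3, c4, c5, c6, c7, c8⟩ := ih qA qB dists lay hcu hgu hnd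
          have hget : (clgFold u du (e :: adj) qA dists lay).2.1.get? e.1 = some x := by
            rw [hred, get?_items_mono dists _ new c2 e.1 hc, hx]
          refine ⟨new, by rw [hred]; exact c1, by rw [hred]; exact c2,
            by rw [hredB]; exact c3, by rw [hredB, hred]; exact c4,
            by rw [hred]; exact c5,
            fun p hp => (c6 p hp).imp (fun c hc' => ⟨List.mem_cons_of_mem _ hc'.1, hc'.2⟩),
            ?_, ?_⟩
          · intro e' he' hp'
            rcases List.mem_cons.mp he' with rfl | he'
            · rw [hred]
              exact contains_items_mono dists _ new c2 e'.1 hc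
            · rw [hred]; exact c7 e' he' hp'
          · rw [p2fold, List.foldl_cons, p2edge,
              if_neg (by rw [hget]; rintro ⟨-, h⟩; exact hx1 (by injection h))]
            rw [hred]; exact c8
      · -- fresh node: enqueue and add the layered edge
        have hc' : dists.contains e.1 = false := by
          simpa using hc
        have hne : u ≠ e.1 := by
          intro h; rw [← h, hcu] at hc'; cases hc'
        have hd2 : (dists.insert e.1 (du + 1)).items = dists.items ++ [(e.1, du + 1)] :=
          PySem.Dict.items_insert_of_not_contains dists _ hc'
        have hgv : (dists.insert e.1 (du + 1)).getD e.1 0 = du + 1 := by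
          simp [PySem.Dict.getD_insert_self]
        have hgu2 : (dists.insert e.1 (du + 1)).getD u 0 = du := by
          rw [PySem.Dict.getD_insert_of_ne dists _ _ hne, hgu]
        have hcu2 : (dists.insert e.1 (du + 1)).contains u = true :=
          contains_items_mono dists _ _ hd2 u hcu
        have hnm : e.1 ∉ dists.keys := by
          intro h
          rw [(PySem.Dict.contains_iff_mem_keys dists e.1).mpr h] at hc'
          cases hc'
        have hnd2 : (dists.insert e.1 (du + 1)).keys.Nodup := by
          have : (dists.insert e.1 (du + 1)).keys = dists.keys ++ [e.1] := by
            simp [PySem.Dict.keys, hd2]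
          rw [this]
          exact hnd.append (List.nodup_singleton _) (by simpa using hnm)
        have hE : clgEdge u du (qA, dists, lay) e
            = (qA ++ [(e.1, du + 1)], dists.insert e.1 (du + 1),
               lay.insert u ((lay.getD u PySem.Dict.empty).insert e.1 e.2)) := by
          simp [clgEdge, hpos, hc, hgv, hgu2]
        have hred : clgFold u du (e :: adj) qA dists lay
            = clgFold u du adj (qA ++ [(e.1, du + 1)]) (dists.insert e.1 (du + 1))
                (lay.insert u ((lay.getD u PySem.Dict.empty).insert e.1 e.2)) := by
          rw [clgFold, List.foldl_cons, hE]; rfl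
        have hredB : bfsFold du (e :: adj) qB dists
            = bfsFold du adj (qB ++ [e.1]) (dists.insert e.1 (du + 1)) := by
          rw [bfsFold, List.foldl_cons, bfsEdge, if_pos ⟨hpos, hc'⟩]; rfl
        obtain ⟨new, c1, c2, c3, c4, c5, c6, c7, c8⟩ :=
          ih (qA ++ [(e.1, du + 1)]) (qB ++ [e.1]) (dists.insert e.1 (du + 1))
            (lay.insert u ((lay.getD u PySem.Dict.empty).insert e.1 e.2)) hcu2 hgu2 hnd2
        have hget : (clgFold u du (e :: adj) qA dists lay).2.1.get? e.1 = some (du + 1) := by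
          rw [hred, get?_items_mono _ _ new c2 e.1 (PySem.Dict.contains_insert_self dists _ _),
            PySem.Dict.get?_insert_self]
        refine ⟨(e.1, du + 1) :: new, ?_, ?_, ?_, ?_, by rw [hred]; exact c5, ?_, ?_, ?_⟩
        · rw [hred, c1, List.append_assoc]; rfl
        · rw [hred, c2, hd2, List.append_assoc]; rfl
        · rw [hredB, c3, List.append_assoc]; rfl
        · rw [hredB, hred]; exact c4
        · rintro p hp
          rcases List.mem_cons.mp hp with rfl | hp
          · exact ⟨e.2, by simp, hpos⟩
          · exact (c6 p hp).imp (fun c hc'' => ⟨List.mem_cons_of_mem _ hc''.1, hc''.2⟩)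
        · intro e' he' hp'
          rcases List.mem_cons.mp he' with rfl | he'
          · rw [hred]
            exact contains_items_mono _ _ new c2 e'.1
              (PySem.Dict.contains_insert_self dists _ _)
          · rw [hred]; exact c7 e' he' hp'
        · rw [p2fold, List.foldl_cons, p2edge, if_pos ⟨hpos, hget⟩, hred]
          exact c8
    · -- capacity not positive: both sides skip the edge
      have hE : clgEdge u du (qA, dists, lay) e = (qA, dists, lay) := by
        simp [clgEdge, hpos]
      have hred : clgFold u du (e :: adj) qA dists lay = clgFold u du adj qA dists lay := by
        rw [clgFold, List.foldl_cons, hE]; rfl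
      have hredB : bfsFold du (e :: adj) qB dists = bfsFold du adj qB dists := by
        rw [bfsFold, List.foldl_cons, bfsEdge, if_neg (by simp [hpos])]; rfl
      obtain ⟨new, c1, c2, c3, c4, c5, c6, c7, c8⟩ := ih qA qB dists lay hcu hgu hnd
      refine ⟨new, by rw [hred]; exact c1, by rw [hred]; exact c2,
        by rw [hredB]; exact c3, by rw [hredB, hred]; exact c4,
        by rw [hred]; exact c5,
        fun p hp => (c6 p hp).imp (fun c hc' => ⟨List.mem_cons_of_mem _ hc'.1, hc'.2⟩),
        ?_, ?_⟩
      · intro e' he' hp'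
        rcases List.mem_cons.mp he' with rfl | he'
        · exact absurd hp' hpos
        · rw [hred]; exact c7 e' he' hp'
      · rw [p2fold, List.foldl_cons, p2edge, if_neg (by rintro ⟨h, -⟩; exact hpos h), hred]
        exact c8

-- the BFS only ever appends to dists
lemma bfsFold_ext (du : Int) (adj : List (Int × Int)) :
    ∀ (q : List Int) (dists : PySem.Dict Int Int),
    ∃ ext, (bfsFold du adj q dists).2.items = dists.items ++ ext := by
  induction adj with
  | nil => intro q dists; exact ⟨[], by simp [bfsFold]⟩
  | cons e adj ih =>
    intro q dists
    by_cases h : 0 < e.2 ∧ dists.contains e.1 = false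
    · obtain ⟨ext, hext⟩ := ih (q ++ [e.1]) (dists.insert e.1 (du + 1))
      refine ⟨(e.1, du + 1) :: ext, ?_⟩
      simp only [bfsFold, List.foldl_cons, bfsEdge, if_pos h] at hext ⊢
      rw [hext, PySem.Dict.items_insert_of_not_contains _ _ h.2, List.append_assoc]
      rfl
    · obtain ⟨ext, hext⟩ := ih q dists
      refine ⟨ext, ?_⟩
      simpa only [bfsFold, List.foldl_cons, bfsEdge, if_neg h] using hext

lemma bfsLoop_ext (graph : List (Int × List (Int × Int))) :
    ∀ (fuel : Nat) (q : List Int) (dists : PySem.Dict Int Int),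
    ∃ ext, (bfsLoop graph fuel q dists).items = dists.items ++ ext := by
  intro fuel
  induction fuel with
  | zero => intro q dists; exact ⟨[], by simp [bfsLoop]⟩
  | succ fuel ih =>
    intro q dists
    match q with
    | [] => exact ⟨[], by simp [bfsLoop]⟩
    | u :: qs =>
      obtain ⟨ext1, h1⟩ := bfsFold_ext (dists.getD u 0) ((PySem.Dict.mk graph).getD u [])
        qs dists
      obtain ⟨ext2, h2⟩ := ih (bfsFold (dists.getD u 0) ((PySem.Dict.mk graph).getD u []) qs dists).1
        (bfsFold (dists.getD u 0) ((PySem.Dict.mk graph).getD u []) qs dists).2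
      exact ⟨ext1 ++ ext2, by simp only [bfsLoop]; rw [h2, h1, List.append_assoc]⟩

-- a Nodup key list contained in pool is no longer than pool's underlying set
lemma size_le_dedup (pool : List Int) (dists : PySem.Dict Int Int)
    (hnd : dists.keys.Nodup) (hsub : dists.keys ⊆ pool) :
    dists.size ≤ pool.dedup.length := by
  have hsub' : dists.keys ⊆ pool.dedup := fun k hk => List.mem_dedup.mpr (hsub hk)
  have h := (hnd.subperm hsub').length_le
  simpa [PySem.Dict.size, PySem.Dict.keys] using h

-- main loop correspondence; pool over-approximates every key that can ever enter dists
lemma loop_corr (graph : List (Int × List (Int × Int))) (pool : List Int)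
    (hpool : ∀ p ∈ graph, ∀ e ∈ p.2, 0 < e.2 → e.1 ∈ pool) :
    ∀ (fuel : Nat) (done qA : List (Int × Int)) (dists : PySem.Dict Int Int)
      (lay : PySem.Dict Int (PySem.Dict Int Int)),
    dists.items = done ++ qA →
    dists.keys.Nodup →
    dists.keys ⊆ pool →
    qA.length + (pool.dedup.length - dists.size) ≤ fuel →
    clgLoop graph fuel qA dists lay
      = List.foldl (p2step graph (bfsLoop graph fuel (qA.map Prod.fst) dists)) lay
          ((bfsLoop graph fuel (qA.map Prod.fst) dists).items.drop done.length) := by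
  intro fuel
  induction fuel with
  | zero =>
    intro done qA dists lay hitems hnd hsub hfuel
    have hq : qA = [] := List.eq_nil_of_length_eq_zero (by omega)
    subst hq
    simp only [clgLoop, bfsLoop]
    rw [hitems]
    simp
  | succ fuel ih =>
    intro done qA dists lay hitems hnd hsub hfuel
    rcases qA with _ | ⟨⟨u, du⟩, qs⟩
    · simp only [clgLoop, bfsLoop, List.map_nil]
      rw [hitems]
      simp
    · have hmem : (u, du) ∈ dists.items := by
        rw [hitems]; exact List.mem_append_right _ List.mem_cons_self
      have hku : u ∈ dists.keys := List.mem_map.mpr ⟨(u, du), hmem, rfl⟩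
      have hcu : dists.contains u = true := (PySem.Dict.contains_iff_mem_keys dists u).mpr hku
      have hgu : dists.getD u 0 = du := PySem.Dict.getD_of_mem_items dists hmem hnd 0
      obtain ⟨new, c1, c2, c3, c4, c5, c6, c7, c8⟩ :=
        step_corr u du ((PySem.Dict.mk graph).getD u []) qs (qs.map Prod.fst) dists lay
          hcu hgu hnd
      have hA : clgLoop graph (fuel + 1) ((u, du) :: qs) dists lay
          = clgLoop graph fuel (clgFold u du ((PySem.Dict.mk graph).getD u []) qs dists lay).1
              (clgFold u du ((PySem.Dict.mk graph).getD u []) qs dists lay).2.1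
              (clgFold u du ((PySem.Dict.mk graph).getD u []) qs dists lay).2.2 := rfl
      have hB : bfsLoop graph (fuel + 1) (((u, du) :: qs).map Prod.fst) dists
          = bfsLoop graph fuel ((qs ++ new).map Prod.fst)
              (clgFold u du ((PySem.Dict.mk graph).getD u []) qs dists lay).2.1 := by
        simp only [List.map_cons, bfsLoop, hgu]
        rw [c3, c4, ← List.map_append]
      -- invariants for the recursive call
      have hitems' : (clgFold u du ((PySem.Dict.mk graph).getD u []) qs dists lay).2.1.items
          = (done ++ [(u, du)]) ++ (qs ++ new) := by
        rw [c2, hitems]; simp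
      have hadj : ∀ k, (∃ c, (k, c) ∈ (PySem.Dict.mk graph).getD u [] ∧ 0 < c) →
          k ∈ pool := by
        rintro k ⟨c, hkc, hcpos⟩
        cases hget : (PySem.Dict.mk graph).get? u with
        | none => rw [PySem.Dict.getD, hget] at hkc; cases hkc
        | some adj0 =>
          have hmemg : (u, adj0) ∈ graph := PySem.Dict.mem_items_of_get?_eq_some _ hget
          have hgetD : (PySem.Dict.mk graph).getD u [] = adj0 := by
            simp [PySem.Dict.getD, hget]
          rw [hgetD] at hkc
          exact hpool (u, adj0) hmemg (k, c) hkc hcpos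
      have hsub' : (clgFold u du ((PySem.Dict.mk graph).getD u []) qs dists lay).2.1.keys
          ⊆ pool := by
        intro k hk
        simp only [PySem.Dict.keys, c2, List.map_append, List.mem_append] at hk
        rcases hk with hk | hk
        · exact hsub hk
        · obtain ⟨p, hp, rfl⟩ := List.mem_map.mp hk
          exact hadj p.1 (c6 p hp)
      have hsize : (clgFold u du ((PySem.Dict.mk graph).getD u []) qs dists lay).2.1.size
          = dists.size + new.length := by
        simp [PySem.Dict.size, c2]
      have hszle := size_le_dedup pool _ c5 hsub'
      have hfuel' : (qs ++ new).length
          + (pool.dedup.length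
              - (clgFold u du ((PySem.Dict.mk graph).getD u []) qs dists lay).2.1.size)
          ≤ fuel := by
        rw [hsize] at hszle ⊢
        simp only [List.length_append, List.length_cons] at hfuel ⊢
        omega
      have hIH := ih (done ++ [(u, du)]) (qs ++ new)
        (clgFold u du ((PySem.Dict.mk graph).getD u []) qs dists lay).2.1
        (clgFold u du ((PySem.Dict.mk graph).getD u []) qs dists lay).2.2
        hitems' c5 hsub' hfuel'
      rw [hA, c1, hIH, hB]
      obtain ⟨ext, hext⟩ := bfsLoop_ext graph fuel ((qs ++ new).map Prod.fst)
        (clgFold u du ((PySem.Dict.mk graph).getD u []) qs dists lay).2.1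
      have hDitems : (bfsLoop graph fuel ((qs ++ new).map Prod.fst)
            (clgFold u du ((PySem.Dict.mk graph).getD u []) qs dists lay).2.1).items
          = done ++ (u, du) :: (qs ++ new ++ ext) := by
        rw [hext, hitems']; simp
      have hdrop1 : (bfsLoop graph fuel ((qs ++ new).map Prod.fst)
            (clgFold u du ((PySem.Dict.mk graph).getD u []) qs dists lay).2.1).items.drop
              done.length
          = (u, du) :: (qs ++ new ++ ext) := by
        rw [hDitems, List.drop_left]
      have hdrop2 : (bfsLoop graph fuel ((qs ++ new).map Prod.fst)
            (clgFold u du ((PySem.Dict.mk graph).getD u []) qs dists lay).2.1).items.drop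
              (done ++ [(u, du)]).length
          = qs ++ new ++ ext := by
        have h2 : (bfsLoop graph fuel ((qs ++ new).map Prod.fst)
              (clgFold u du ((PySem.Dict.mk graph).getD u []) qs dists lay).2.1).items
            = (done ++ [(u, du)]) ++ (qs ++ new ++ ext) := by
          rw [hDitems]; simp
        rw [h2, List.drop_left]
      have hp2 : p2step graph (bfsLoop graph fuel ((qs ++ new).map Prod.fst)
            (clgFold u du ((PySem.Dict.mk graph).getD u []) qs dists lay).2.1) lay (u, du)
          = (clgFold u du ((PySem.Dict.mk graph).getD u []) qs dists lay).2.2 := by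
        rw [p2step, c8]
        unfold p2fold
        refine (PySem.List.foldl_congr_mem' _ _ _ _ ?_).symm
        intro e he acc
        unfold p2edge
        by_cases hp : 0 < e.2
        · rw [get?_items_mono _ _ ext hext e.1 (c7 e he hp)]
        · rw [if_neg (by rintro ⟨h, -⟩; exact hp h), if_neg (by rintro ⟨h, -⟩; exact hp h)]
      rw [hdrop1, hdrop2, List.foldl_cons, hp2]

-- ===== VERDICT (by name: the statement is the Claim_ definition above) =====
theorem construct_layered_graph_spec : Claim_equal_construct_layered_graph := by
  intro graph source _hDom _hPre
  show construct_layered_graph graph source = construct_layered_graph_alt graph source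
  have hpool : ∀ p ∈ graph, ∀ e ∈ p.2, 0 < e.2 → e.1
      ∈ source :: graph.flatMap (fun p => p.2.map Prod.fst) := by
    intro p hp e he _
    exact List.mem_cons_of_mem _
      (List.mem_flatMap.mpr ⟨p, hp, List.mem_map.mpr ⟨e, he, rfl⟩⟩)
  have hsrc : (PySem.Dict.mk [((source : Int), (0 : Int))]).keys = [source] := by
    simp [PySem.Dict.keys]
  have hPlen : (source :: graph.flatMap (fun p => p.2.map Prod.fst)).dedup.length
      ≤ 1 + (graph.flatMap (fun p => p.2)).length := by
    have h := (List.dedup_sublist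
      (source :: graph.flatMap (fun p => p.2.map Prod.fst))).length_le
    simp only [List.length_cons, List.length_flatMap, List.length_map] at h ⊢
    omega
  have h := loop_corr graph (source :: graph.flatMap (fun p => p.2.map Prod.fst)) hpool
    (graph.length + (graph.flatMap (fun p => p.2)).length + 1) [] [(source, 0)]
    (PySem.Dict.mk [(source, 0)]) PySem.Dict.empty rfl
    (by rw [hsrc]; exact List.nodup_singleton _)
    (by rw [hsrc]
        intro k hk
        rcases List.mem_singleton.mp hk with rfl
        exact List.mem_cons_self)
    (by simp only [List.length_cons, List.length_nil, PySem.Dict.size]; omega)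
  rw [construct_layered_graph, construct_layered_graph_alt, h]
  simp
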